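-- pv_equiv track=rewrite | github.com/zigbeefordomoticz/Domoticz-Zigbee | Modules/domoTools.py | subtypeRGB_FromProfile_Device_IDs
-- ===== SOURCE A (Python) =====
-- def subtypeRGB_FromProfile_Device_IDs(EndPoints, Model, ProfileID, ZDeviceID, ColorInfos=None):
--
--     # Type 0xF1    pTypeColorSwitch
--     # Switchtype 7 STYPE_Dimmer
--     # SubType sTypeColor_RGB_W                0x01 // RGB + white, either RGB or white can be lit
--     # SubType sTypeColor_White                0x03 // Monochrome white
--     # SubType sTypeColor_RGB_CW_WW            0x04 // RGB + cold white + warm white, either RGB or white can be lit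
--     # SubType sTypeColor_LivCol               0x05
--     # SubType sTypeColor_RGB_W_Z              0x06 // Like RGBW, but allows combining RGB and white
--     # The test should be done in an other way ( ProfileID for instance )
--     # default: SubType sTypeColor_RGB_CW_WW_Z 0x07 // Like RGBWW, # but allows combining RGB and white
--
--     ColorControlRGB = 0x02  # RGB color palette / Dimable
--     ColorControlRGBWW = 0x04  # RGB + WW
--     ColorControlFull = 0x07  # 3 Color palettes widget
--     ColorControlWW = 0x08  # WW
--     ColorControlRGBWZ = 0x06  # RGB W Z
--     ColorControlRGBW = 0x01  # RGB W
--
--     Subtype = None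
--     ZLL_Commissioning = False
--
--     ColorMode = 0
--     if ColorInfos and "ColorMode" in ColorInfos:
--         ColorMode = ColorInfos["ColorMode"]
--
--     for iterEp in EndPoints:
--         if "1000" in iterEp:
--             ZLL_Commissioning = True
--             break
--
--     # Device specifics section
--     if Model and Model == "lumi.light.aqcn02":
--         Subtype = ColorControlWW
--
--     # Philipps Hue
--     if Subtype is None and ProfileID == "a1e0" and ZDeviceID == "0061":
--         Subtype = ColorControlRGBWW
--
--     # ZLL LightLink
--     if Subtype is None and ProfileID == "c05e":
--         # We should Check that ZLL Commissioning is also there. Cluster 0x1000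
--         if ZDeviceID == "0100":  # LED1622G12.Tradfri ou phillips hue white
--             pass
--
--         elif ZDeviceID == "0200":  # ampoule Tradfri LED1624G9
--             Subtype = ColorControlFull
--
--         elif ZDeviceID == "0210":  #
--             Subtype = ColorControlRGBWW
--
--         elif ZDeviceID == "0220":  # ampoule Tradfi LED1545G12.Tradfri
--             Subtype = ColorControlWW
--
--     # Home Automation / ZHA
--     if Subtype is None and ProfileID == "0104":  # Home Automation
--         if ZLL_Commissioning and ZDeviceID == "0100":  # Most likely IKEA Tradfri bulb LED1622G12
--             Subtype = ColorControlWW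
--
--         elif ZDeviceID == "0101":  # Dimable light
--             pass
--
--         elif ZDeviceID == "0102":  # Color dimable light
--             Subtype = ColorControlFull
--
--         elif ZDeviceID == "010c":  # White color temperature light
--             Subtype = ColorControlWW
--
--         elif ZDeviceID == "010d":  # Extended color light
--             # ZBT-ExtendedColor /  Müller-Licht 44062 "tint white + color" (LED E27 9,5W 806lm 1.800-6.500K RGB)
--             Subtype = ColorControlRGBWW
--
--     if Subtype is None and ColorInfos:
--         if ColorMode == 2:
--             Subtype = ColorControlWW
--
--         elif ColorMode == 1:
--             Subtype = ColorControlRGB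
--
--         else:
--             Subtype = ColorControlFull
--
--     if Subtype is None:
--         Subtype = ColorControlFull
--
--     return Subtype
-- ===== SOURCE B (Python) =====
-- def subtypeRGB_FromProfile_Device_IDs(EndPoints, Model, ProfileID, ZDeviceID, ColorInfos=None):
--     # Built back-to-front: a flat list of (condition, value) rules ordered from the
--     # weakest (ColorMode fallback) to the strongest (Model special case), folded with
--     # last-write-wins.  This is equivalent to A's first-match cascade because the
--     # profile/device rules are pairwise mutually exclusive.
--     cm = ColorInfos.get("ColorMode", 0) if ColorInfos else 0
--     zll = any("1000" in ep for ep in EndPoints)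
--     rules = [
--         (bool(ColorInfos), 0x07),
--         (bool(ColorInfos) and cm == 1, 0x02),
--         (bool(ColorInfos) and cm == 2, 0x08),
--         (ProfileID == "0104" and ZDeviceID == "0100" and zll, 0x08),
--         (ProfileID == "0104" and ZDeviceID == "010d", 0x04),
--         (ProfileID == "0104" and ZDeviceID == "010c", 0x08),
--         (ProfileID == "0104" and ZDeviceID == "0102", 0x07),
--         (ProfileID == "c05e" and ZDeviceID == "0220", 0x08),
--         (ProfileID == "c05e" and ZDeviceID == "0210", 0x04),
--         (ProfileID == "c05e" and ZDeviceID == "0200", 0x07),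
--         (ProfileID == "a1e0" and ZDeviceID == "0061", 0x04),
--         (Model == "lumi.light.aqcn02", 0x08),
--     ]
--     sub = 0x07  # ultimate default
--     for cond, val in rules:
--         if cond:
--             sub = val
--     return sub
-- ===== Notes on version B (the rewrite author's own statement) =====
-- stated objective: alternative
-- what changed: Replaces A's mutable None-sentinel cascade of nested if/elif blocks with a declarative flat rule table built back-to-front: all (condition,value) rules are listed weakest-first and folded with last-write-wins, correct because the profile/device rules are pairwise mutually exclusive.
import Mathlib
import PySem

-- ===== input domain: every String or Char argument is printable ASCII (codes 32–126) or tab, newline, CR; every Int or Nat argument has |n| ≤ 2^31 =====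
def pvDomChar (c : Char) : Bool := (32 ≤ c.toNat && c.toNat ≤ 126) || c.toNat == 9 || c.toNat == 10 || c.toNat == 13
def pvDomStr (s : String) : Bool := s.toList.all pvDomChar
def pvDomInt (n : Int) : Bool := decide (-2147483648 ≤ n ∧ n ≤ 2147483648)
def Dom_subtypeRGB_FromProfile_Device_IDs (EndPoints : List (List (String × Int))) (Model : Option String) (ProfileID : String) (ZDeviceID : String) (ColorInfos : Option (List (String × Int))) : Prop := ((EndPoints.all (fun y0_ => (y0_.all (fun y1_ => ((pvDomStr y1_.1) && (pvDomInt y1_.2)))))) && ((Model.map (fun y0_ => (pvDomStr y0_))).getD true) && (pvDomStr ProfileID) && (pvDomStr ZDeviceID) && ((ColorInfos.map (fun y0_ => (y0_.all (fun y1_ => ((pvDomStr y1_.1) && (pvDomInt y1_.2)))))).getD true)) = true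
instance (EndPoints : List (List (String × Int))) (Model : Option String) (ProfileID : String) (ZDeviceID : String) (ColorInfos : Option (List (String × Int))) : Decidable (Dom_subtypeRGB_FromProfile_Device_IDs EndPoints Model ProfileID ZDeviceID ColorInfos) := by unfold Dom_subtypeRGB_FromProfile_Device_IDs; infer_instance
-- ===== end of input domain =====

-- B replaces A's None-sentinel if/elif cascade with a flat last-write-wins rule list built
-- back-to-front (weakest rule first, Model last); equivalent since the profile/device rules are
-- mutually exclusive (objective: alternative; same cost).


-- ===== PORT A =====
def pvAnyKey1000 (ep : List (String × Int)) : Bool := ep.any (fun kv => kv.1 == "1000")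

def subtypeRGB_FromProfile_Device_IDs (EndPoints : List (List (String × Int))) (Model : Option String) (ProfileID : String) (ZDeviceID : String) (ColorInfos : Option (List (String × Int))) : Int :=
  -- ColorMode = ColorInfos["ColorMode"] if ColorInfos and "ColorMode" in ColorInfos else 0
  let ColorMode : Int :=
    match ColorInfos with
    | some ci =>
        if !ci.isEmpty && ci.any (fun kv => kv.1 == "ColorMode") then
          ((ci.find? (fun kv => kv.1 == "ColorMode")).map (fun kv => kv.2)).getD 0
        else 0
    | none => 0
  -- for iterEp in EndPoints: if "1000" in iterEp: ZLL = True; break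
  let ZLL_Commissioning : Bool := EndPoints.foldl (fun acc ep => acc || pvAnyKey1000 ep) false
  let Subtype : Option Int := if Model = some "lumi.light.aqcn02" then some 8 else none
  let Subtype : Option Int :=
    if Subtype = none ∧ ProfileID = "a1e0" ∧ ZDeviceID = "0061" then some 4 else Subtype
  let Subtype : Option Int :=
    if Subtype = none ∧ ProfileID = "c05e" then
      if ZDeviceID = "0100" then Subtype
      else if ZDeviceID = "0200" then some 7
      else if ZDeviceID = "0210" then some 4
      else if ZDeviceID = "0220" then some 8
      else Subtype
    else Subtype
  let Subtype : Option Int :=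
    if Subtype = none ∧ ProfileID = "0104" then
      if ZLL_Commissioning ∧ ZDeviceID = "0100" then some 8
      else if ZDeviceID = "0101" then Subtype
      else if ZDeviceID = "0102" then some 7
      else if ZDeviceID = "010c" then some 8
      else if ZDeviceID = "010d" then some 4
      else Subtype
    else Subtype
  let ciTruthy : Bool := match ColorInfos with | some ci => !ci.isEmpty | none => false
  let Subtype : Option Int :=
    if Subtype = none ∧ ciTruthy then
      if ColorMode = 2 then some 8
      else if ColorMode = 1 then some 2
      else some 7
    else Subtype
  match Subtype with
  | some v => v
  | none => 7

-- ===== PORT B =====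
def subtypeRGB_FromProfile_Device_IDs_alt (EndPoints : List (List (String × Int))) (Model : Option String) (ProfileID : String) (ZDeviceID : String) (ColorInfos : Option (List (String × Int))) : Int :=
  -- cm = ColorInfos.get("ColorMode", 0) if ColorInfos else 0
  let cm : Int :=
    match ColorInfos with
    | some ci => if !ci.isEmpty then ((ci.find? (fun kv => kv.1 == "ColorMode")).map (fun kv => kv.2)).getD 0 else 0
    | none => 0
  let truthy : Bool := match ColorInfos with | some ci => !ci.isEmpty | none => false
  let zll : Bool := EndPoints.any (fun ep => ep.any (fun kv => kv.1 == "1000"))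
  -- flat rule table, weakest first; folded with last-write-wins
  let rules : List (Bool × Int) :=
    [(truthy, 7), (truthy && cm == 1, 2), (truthy && cm == 2, 8),
     (ProfileID == "0104" && ZDeviceID == "0100" && zll, 8),
     (ProfileID == "0104" && ZDeviceID == "010d", 4),
     (ProfileID == "0104" && ZDeviceID == "010c", 8),
     (ProfileID == "0104" && ZDeviceID == "0102", 7),
     (ProfileID == "c05e" && ZDeviceID == "0220", 8),
     (ProfileID == "c05e" && ZDeviceID == "0210", 4),
     (ProfileID == "c05e" && ZDeviceID == "0200", 7),
     (ProfileID == "a1e0" && ZDeviceID == "0061", 4),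
     (Model == some "lumi.light.aqcn02", 8)]
  rules.foldl (fun s cv => if cv.1 then cv.2 else s) 7

-- ===== PRECONDITION & SPEC =====
def Spec_subtypeRGB_FromProfile_Device_IDs (EndPoints : List (List (String × Int))) (Model : Option String) (ProfileID : String) (ZDeviceID : String) (ColorInfos : Option (List (String × Int))) (out : Int) : Prop := out = subtypeRGB_FromProfile_Device_IDs_alt EndPoints Model ProfileID ZDeviceID ColorInfos
instance (EndPoints : List (List (String × Int))) (Model : Option String) (ProfileID : String) (ZDeviceID : String) (ColorInfos : Option (List (String × Int))) (out : Int) : Decidable (Spec_subtypeRGB_FromProfile_Device_IDs EndPoints Model ProfileID ZDeviceID ColorInfos out) := by unfold Spec_subtypeRGB_FromProfile_Device_IDs; infer_instance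

-- ===== CLAIM (what is proved, stated in full; the proofs are below) =====
def Claim_equal_subtypeRGB_FromProfile_Device_IDs : Prop := ∀ (EndPoints : List (List (String × Int))) (Model : Option String) (ProfileID : String) (ZDeviceID : String) (ColorInfos : Option (List (String × Int))), Dom_subtypeRGB_FromProfile_Device_IDs EndPoints Model ProfileID ZDeviceID ColorInfos → Spec_subtypeRGB_FromProfile_Device_IDs EndPoints Model ProfileID ZDeviceID ColorInfos (subtypeRGB_FromProfile_Device_IDs EndPoints Model ProfileID ZDeviceID ColorInfos)

-- ===== LEMMAS AND PROOFS =====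
lemma pvFoldlOr_eq_any (EndPoints : List (List (String × Int))) :
    EndPoints.foldl (fun acc ep => acc || pvAnyKey1000 ep) false
      = EndPoints.any (fun ep => ep.any (fun kv => kv.1 == "1000")) := by
  have h : ∀ (l : List (List (String × Int))) (b : Bool),
      l.foldl (fun acc ep => acc || pvAnyKey1000 ep) b
        = (b || l.any (fun ep => ep.any (fun kv => kv.1 == "1000"))) := by
    intro l
    induction l with
    | nil => simp
    | cons x xs ih =>
        intro b
        rw [List.foldl_cons, ih]
        simp [pvAnyKey1000, Bool.or_assoc]
  simpa using h EndPoints false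

lemma pvFallback_eq (C : Option (List (String × Int))) :
    (let cmA : Int :=
       match C with
       | some ci =>
           if (!ci.isEmpty && ci.any fun kv => kv.1 == "ColorMode") = true then
             (Option.map (fun kv => kv.2) (List.find? (fun kv => kv.1 == "ColorMode") ci)).getD 0
           else 0
       | none => 0
     let ciT : Bool :=
       match C with
       | some ci => !ci.isEmpty
       | none => false
     (match
        if ciT = true then
          if cmA = 2 then some (8:Int) else if cmA = 1 then some 2 else some 7
        else none with
      | some v => v
      | none => 7))
    = (let cmB : Int :=
         match C with
         | some ci => if !ci.isEmpty then (Option.map (fun kv => kv.2) (List.find? (fun kv => kv.1 == "ColorMode") ci)).getD 0 else 0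
         | none => 0
       let ciT : Bool :=
         match C with
         | some ci => !ci.isEmpty
         | none => false
       [(ciT, (7:Int)), (ciT && cmB == 1, 2), (ciT && cmB == 2, 8)].foldl
         (fun s cv => if cv.1 then cv.2 else s) 7) := by
  cases C with
  | none => simp
  | some ci =>
      by_cases he : ci = []
      · simp [he]
      · by_cases hAny : (ci.any fun kv => kv.1 == "ColorMode") = true
        · simp only [he, hAny, List.isEmpty_eq_false_iff, Bool.and_true, Bool.true_and,
            List.foldl, Bool.not_eq_true']
          simp [he]
          split_ifs <;> simp_all <;> omega
        · have hf : List.find? (fun kv => kv.1 == "ColorMode") ci = none := by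
            rw [List.find?_eq_none]
            intro x hx hbeq
            exact hAny (List.any_eq_true.mpr ⟨x, hx, hbeq⟩)
          simp [he, hAny, hf, List.foldl]

theorem subtypeRGB_FromProfile_Device_IDs_spec : Claim_equal_subtypeRGB_FromProfile_Device_IDs := by
  intro E M P Z C _
  unfold Spec_subtypeRGB_FromProfile_Device_IDs
  unfold subtypeRGB_FromProfile_Device_IDs subtypeRGB_FromProfile_Device_IDs_alt
  rw [pvFoldlOr_eq_any]
  by_cases hM : M = some "lumi.light.aqcn02"
  · simp [hM, List.foldl]
  · by_cases h1 : P = "a1e0"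
    · subst h1
      by_cases z : Z = "0061"
      · subst z; simp [hM, List.foldl]
      · simp only [hM, z, Ne.symm z]
        simpa [hM, z, List.foldl] using pvFallback_eq C
    · by_cases h2 : P = "c05e"
      · subst h2
        by_cases z2 : Z = "0200"
        · subst z2; simp [hM, List.foldl]
        · by_cases z3 : Z = "0210"
          · subst z3; simp [hM, List.foldl]
          · by_cases z4 : Z = "0220"
            · subst z4; simp [hM, List.foldl]
            · simpa [hM, z2, Ne.symm z2, z3, Ne.symm z3, z4, Ne.symm z4, List.foldl]
                using pvFallback_eq C
      · by_cases h3 : P = "0104"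
        · subst h3
          by_cases z0 : Z = "0100"
          · subst z0
            by_cases hz : (E.any fun ep => ep.any fun kv => kv.1 == "1000") = true
            · simp [hM, hz, List.foldl]
            · simpa [hM, hz, List.foldl] using pvFallback_eq C
          · by_cases z5 : Z = "0102"
            · subst z5; simp [hM, List.foldl]
            · by_cases z6 : Z = "010c"
              · subst z6; simp [hM, List.foldl]
              · by_cases z7 : Z = "010d"
                · subst z7; simp [hM, List.foldl]
                · simpa [hM, z0, z5, Ne.symm z5, z6, Ne.symm z6, z7, Ne.symm z7, List.foldl]
                    using pvFallback_eq C
        · simpa [hM, h1, Ne.symm h1, h2, Ne.symm h2, h3, Ne.symm h3, List.foldl]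
            using pvFallback_eq C
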